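-- pv_equiv track=rewrite | github.com/CREATIVE5-io/Hestia-IoT-web | app/models/ntn_manager.py | _at_command_to_ascii
-- ===== SOURCE A (Python) =====
-- def _at_command_to_ascii(cmd):
--     """
--     Convert AT command string to list of ASCII codes
--     Args:
--         command (str): AT command string
--     Returns:
--         list: List of ASCII codes with padding
--     """
--     ascii_codes = []
--     result = []
--     for char in cmd:
--         ascii_codes.append(ord(char))
--     if len(ascii_codes)%2 != 0:
--         ascii_codes.append(0)
--
--     # Process pairs of bytes
--     for i in range(0, len(ascii_codes)-1, 2):
--         # Shift first byte left 8 bits and add second byte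
--         combined = (ascii_codes[i] << 8) + ascii_codes[i + 1]
--         result.append(combined)
--     return result
-- ===== SOURCE B (Python) =====
-- def _at_command_to_ascii(cmd):
--     """One-pass state machine: stream the characters, holding at most one
--     pending high byte; a completed pair is flushed immediately, and a
--     leftover pending byte is flushed with a zero low byte at the end.
--     No intermediate code list, no padding step, no index arithmetic."""
--     result = []
--     pending = None
--     for ch in cmd:
--         if pending is None:
--             pending = ord(ch)
--         else:
--             result.append((pending << 8) + ord(ch))
--             pending = None
--     if pending is not None:
--         result.append(pending << 8)
--     return result
-- ===== Notes on version B (the rewrite author's own statement) =====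
-- stated objective: alternative
-- what changed: Replaces A's staged passes (materialise the full ord list, pad it to even length, then walk it by index in strides of 2) with a single streaming pass holding one piece of state, a pending high byte, flushing each completed pair immediately and the odd tail at the end; no index arithmetic, no intermediate list, no padding step.
import Mathlib
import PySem

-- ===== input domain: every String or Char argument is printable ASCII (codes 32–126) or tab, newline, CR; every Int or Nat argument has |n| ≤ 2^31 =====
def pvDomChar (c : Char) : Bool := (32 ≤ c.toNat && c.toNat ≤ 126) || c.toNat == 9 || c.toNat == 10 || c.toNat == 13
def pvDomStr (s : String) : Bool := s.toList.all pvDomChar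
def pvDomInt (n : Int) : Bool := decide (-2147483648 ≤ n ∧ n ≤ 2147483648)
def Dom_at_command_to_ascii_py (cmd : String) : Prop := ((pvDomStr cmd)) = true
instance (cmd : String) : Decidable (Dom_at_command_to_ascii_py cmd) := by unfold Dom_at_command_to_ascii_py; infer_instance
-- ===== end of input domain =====

-- B replaces A's staged passes (ord list, even-length padding, index loop in strides of 2) by a
-- single streaming pass holding one pending high byte, flushed pair by pair: alternative, same O(n).

-- ===== PORT A =====
def at_command_to_ascii_py (cmd : String) : List Int :=
  let ascii_codes : List Int := cmd.toList.foldl (fun acc ch => acc ++ [(ch.toNat : Int)]) []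
  let ascii_codes := if ascii_codes.length % 2 ≠ 0 then ascii_codes ++ [0] else ascii_codes
  (PySem.List.pyRange 0 ((ascii_codes.length : Int) - 1) 2).foldl
    (fun result i =>
      result ++ [(PySem.List.pyGetD ascii_codes i 0) <<< 8 + PySem.List.pyGetD ascii_codes (i + 1) 0]) []

-- ===== PORT B =====
-- one-pass state machine: state = (result so far, pending high byte), final flush of the pending byte
def at_command_to_ascii_py_alt (cmd : String) : List Int :=
  let st : List Int × Option Int := cmd.toList.foldl
    (fun (st : List Int × Option Int) ch =>
      match st.2 with
      | none => (st.1, some ((ch.toNat : Int)))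
      | some p => (st.1 ++ [p <<< 8 + (ch.toNat : Int)], none)) ([], none)
  match st.2 with
  | none => st.1
  | some p => st.1 ++ [p <<< 8]

-- ===== PRECONDITION & SPEC =====
def Spec_at_command_to_ascii_py (cmd : String) (out : List Int) : Prop := out = at_command_to_ascii_py_alt cmd
instance (cmd : String) (out : List Int) : Decidable (Spec_at_command_to_ascii_py cmd out) := by unfold Spec_at_command_to_ascii_py; infer_instance

-- ===== CLAIM (what is proved, stated in full; the proofs are below) =====
def Claim_equal_at_command_to_ascii_py : Prop := ∀ (cmd : String), Dom_at_command_to_ascii_py cmd → Spec_at_command_to_ascii_py cmd (at_command_to_ascii_py cmd)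

-- ===== LEMMAS AND PROOFS =====

-- reference function: pack the characters two at a time
def pvPack : List Char → List Int
  | [] => []
  | [a] => [(a.toNat : Int) <<< 8]
  | a :: b :: t => ((a.toNat : Int) <<< 8 + (b.toNat : Int)) :: pvPack t

-- B's step and final flush, named for the proofs
def pvStep (st : List Int × Option Int) (ch : Char) : List Int × Option Int :=
  match st.2 with
  | none => (st.1, some ((ch.toNat : Int)))
  | some p => (st.1 ++ [p <<< 8 + (ch.toNat : Int)], none)

def pvFin (st : List Int × Option Int) : List Int :=
  match st.2 with
  | none => st.1
  | some p => st.1 ++ [p <<< 8]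

lemma b_fold (l : List Char) : ∀ (res : List Int),
    pvFin (l.foldl pvStep (res, none)) = res ++ pvPack l := by
  induction l using pvPack.induct with
  | case1 => intro res; simp [pvFin, pvPack]
  | case2 a => intro res; simp [pvStep, pvFin, pvPack]
  | case3 a b t ih =>
      intro res
      simp only [List.foldl_cons, pvStep]
      rw [ih (res ++ [(a.toNat : Int) <<< 8 + (b.toNat : Int)])]
      simp [pvPack]

lemma b_eq_pack (cmd : String) : at_command_to_ascii_py_alt cmd = pvPack cmd.toList := by
  unfold at_command_to_ascii_py_alt
  have := b_fold cmd.toList []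
  simpa [pvStep, pvFin] using this

-- A's padded code list
def pvPad (l : List Char) : List Int :=
  let m := l.map (fun ch => ((ch.toNat : Int)))
  if m.length % 2 ≠ 0 then m ++ [0] else m

lemma pad_cons2 (a b : Char) (t : List Char) :
    pvPad (a :: b :: t) = (a.toNat : Int) :: (b.toNat : Int) :: pvPad t := by
  unfold pvPad
  simp only [List.map_cons, List.length_cons]
  by_cases h : (t.map (fun ch => ((ch.toNat : Int)))).length % 2 ≠ 0
  · rw [if_pos (by omega), if_pos h]; simp
  · rw [if_neg (by omega), if_neg h]

lemma pad_len_even (l : List Char) : (pvPad l).length % 2 = 0 := by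
  unfold pvPad
  by_cases h : (l.map (fun ch => ((ch.toNat : Int)))).length % 2 ≠ 0
  · rw [if_pos h]
    simp only [List.length_append, List.length_map, List.length_singleton]
    simp only [List.length_map] at h
    omega
  · rw [if_neg h]; omega

-- A's pair loop written as a map over indices
def pvGmap (p : List Int) : List Int :=
  (List.range (p.length / 2)).map (fun k => p.getD (2 * k) 0 <<< 8 + p.getD (2 * k + 1) 0)

lemma gmap_pad (l : List Char) : pvGmap (pvPad l) = pvPack l := by
  induction l using pvPack.induct with
  | case1 => simp [pvGmap, pvPad, pvPack]
  | case2 a => simp [pvGmap, pvPad, pvPack, List.range_succ]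
  | case3 a b t ih =>
      rw [pad_cons2]
      unfold pvGmap at ih ⊢
      simp only [List.length_cons]
      rw [show ((pvPad t).length + 1 + 1) / 2 = (pvPad t).length / 2 + 1 by omega]
      rw [List.range_succ_eq_map]
      simp only [List.map_cons, List.map_map]
      rw [show (2 : Nat) * 0 = 0 by ring]
      simp only [List.getD_cons_zero, List.getD_cons_succ, pvPack]
      refine congrArg₂ List.cons rfl ?_
      rw [← ih]
      apply List.map_congr_left
      intro k _
      simp only [Function.comp_apply]
      rw [show 2 * (k + 1) = (2 * k + 1) + 1 by ring]
      simp

lemma getD_int (p : List Int) (j : Nat) :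
    PySem.List.pyGetD p ((j : Nat) : Int) 0 = p.getD j 0 := by
  rw [PySem.List.pyGetD_natCast]

lemma a_eq_gmap (cmd : String) : at_command_to_ascii_py cmd = pvGmap (pvPad cmd.toList) := by
  unfold at_command_to_ascii_py
  rw [PySem.List.foldl_append_singleton_eq_map]
  simp only [List.nil_append]
  rw [PySem.List.foldl_append_singleton_eq_map]
  simp only [List.nil_append]
  have hp : (if (cmd.toList.map (fun ch => ((ch.toNat : Int)))).length % 2 ≠ 0
      then cmd.toList.map (fun ch => ((ch.toNat : Int))) ++ [0]
      else cmd.toList.map (fun ch => ((ch.toNat : Int)))) = pvPad cmd.toList := by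
    unfold pvPad; rfl
  rw [hp]
  set p := pvPad cmd.toList with hpdef
  have heven : p.length % 2 = 0 := pad_len_even cmd.toList
  rw [PySem.List.pyRange_of_pos _ _ (by norm_num : (0:Int) < 2)]
  have hcnt : (if (0:Int) < (p.length : Int) - 1
      then (((p.length : Int) - 1 - 0 + 2 - 1) / 2).toNat else 0) = p.length / 2 := by
    split_ifs with h <;> omega
  rw [hcnt]
  unfold pvGmap
  rw [List.map_map]
  apply List.map_congr_left
  intro k hk
  simp only [List.mem_range] at hk
  simp only [Function.comp_apply]
  rw [show (0 + 2 * (k : Int)) = ((2 * k : Nat) : Int) by push_cast; ring,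
      getD_int]
  rw [show ((2 * k : Nat) : Int) + 1 = ((2 * k + 1 : Nat) : Int) by push_cast; ring,
      getD_int]

-- ===== VERDICT (by name: the statement is the Claim_ definition above) =====
theorem at_command_to_ascii_py_spec : Claim_equal_at_command_to_ascii_py := by
  intro cmd _
  unfold Spec_at_command_to_ascii_py
  rw [a_eq_gmap, gmap_pad, b_eq_pack]
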